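-- pv_equiv track=rewrite | github.com/wyk18703232953/myResearch | codeComplex/data/filteredData/python/np/python_np_0410.py | build_A
-- ===== SOURCE A (Python) =====
-- def build_A(N, M):
--     A = []
--     for i in range(N):
--         row = []
--         for j in range(M):
--             val = (i + 1) * (j + 2)
--             row.append(val)
--         A.append(row)
--     return A
-- ===== SOURCE B (Python) =====
-- def build_A(N, M):
--     # DP by repeated addition: row_{i+1} = row_i + base elementwise, no multiplication.
--     if N <= 0:
--         return []
--     base = list(range(2, M + 2))
--     A = []
--     row = base
--     for _ in range(N):
--         A.append(row)
--         row = [x + b for x, b in zip(row, base)]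
--     return A
-- ===== Notes on version B (the rewrite author's own statement) =====
-- stated objective: alternative
-- what changed: B replaces the per-cell multiplication (i+1)*(j+2) by a DP: it builds the base row [2..M+1] once and derives each next row from the previous one by elementwise addition of the base row, so the inner computation is additive recurrence instead of recomputing products.
import Mathlib
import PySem

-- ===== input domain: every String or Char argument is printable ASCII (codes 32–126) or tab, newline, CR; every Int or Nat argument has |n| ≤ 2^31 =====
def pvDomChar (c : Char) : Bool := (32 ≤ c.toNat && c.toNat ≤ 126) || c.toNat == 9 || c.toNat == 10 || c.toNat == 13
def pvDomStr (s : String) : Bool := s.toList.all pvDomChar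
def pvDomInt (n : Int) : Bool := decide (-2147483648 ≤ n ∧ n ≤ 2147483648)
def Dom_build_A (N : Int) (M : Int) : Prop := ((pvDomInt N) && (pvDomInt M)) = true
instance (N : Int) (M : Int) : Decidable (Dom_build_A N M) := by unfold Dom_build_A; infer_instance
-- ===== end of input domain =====

-- B derives each row from the previous one by elementwise addition of the base row (a DP), instead of a per-cell multiplication; same cost, different algorithm.
-- ===== PORT A =====
-- append-accumulate loops are transliterated as cons-accumulate + final reverse (same traversal, linear)
def build_A (N : Int) (M : Int) : List (List Int) :=
  ((PySem.List.pyRange 0 N 1).foldl (fun A i =>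
    ((PySem.List.pyRange 0 M 1).foldl (fun row j => (i + 1) * (j + 2) :: row) []).reverse :: A) []).reverse

-- ===== PORT B =====
def build_A_alt (N : Int) (M : Int) : List (List Int) :=
  if N ≤ 0 then []
  else
  let base := PySem.List.pyRange 2 (M + 2) 1
  (((PySem.List.pyRange 0 N 1).foldl
      (fun (p : List (List Int) × List Int) _ => (p.2 :: p.1, List.zipWith (· + ·) p.2 base))
      ([], base)).1).reverse

-- ===== PRECONDITION & SPEC =====
def Spec_build_A (N : Int) (M : Int) (out : List (List Int)) : Prop := out = build_A_alt N M
instance (N : Int) (M : Int) (out : List (List Int)) : Decidable (Spec_build_A N M out) := by unfold Spec_build_A; infer_instance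

-- ===== CLAIM =====
def Claim_equal_build_A : Prop := ∀ (N : Int) (M : Int), Dom_build_A N M → Spec_build_A N M (build_A N M)

-- ===== LEMMAS AND PROOFS =====
theorem foldl_cons_eq_reverse_map {α β : Type} (f : α → β) (l : List α) (init : List β) :
    l.foldl (fun acc x => f x :: acc) init = (l.map f).reverse ++ init := by
  induction l generalizing init with
  | nil => simp
  | cons x xs ih => simp [List.foldl, ih]

theorem zipWith_add_map_self (base : List Int) (c : Int) :
    List.zipWith (· + ·) (base.map (fun b => c * b)) base = base.map (fun b => (c + 1) * b) := by
  induction base with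
  | nil => rfl
  | cons b bs ih => simp [ih]; ring

theorem dp_fold_eq (base : List Int) (l : List Int) (acc : List (List Int)) (c : Int) :
    ((l.foldl
        (fun (p : List (List Int) × List Int) _ => (p.2 :: p.1, List.zipWith (· + ·) p.2 base))
        (acc, base.map (fun b => c * b))).1).reverse
      = acc.reverse ++ (List.range l.length).map (fun (k : Nat) => base.map (fun b => (c + (k : Int)) * b)) := by
  induction l generalizing acc c with
  | nil => simp
  | cons x xs ih =>
      rw [List.foldl_cons, zipWith_add_map_self, ih, List.length_cons,
        List.range_succ_eq_map, List.map_cons, List.map_map,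
        List.reverse_cons, List.append_assoc, List.singleton_append]
      congr 1
      congr 1
      · simp
      · congr 1; funext k; simp only [Function.comp_apply]; congr 1; funext b
        push_cast; ring

-- ===== VERDICT =====
theorem build_A_spec : Claim_equal_build_A := by
  intro N M _
  unfold Spec_build_A build_A
  by_cases hN : N ≤ 0
  · have hr : PySem.List.pyRange 0 N 1 = [] := by
      rw [PySem.List.pyRange_one]; simp; omega
    simp [build_A_alt, hN, hr]
  have halt : build_A_alt N M
      = (((PySem.List.pyRange 0 N 1).foldl
          (fun (p : List (List Int) × List Int) _ =>
            (p.2 :: p.1, List.zipWith (· + ·) p.2 (PySem.List.pyRange 2 (M + 2) 1)))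
          ([], (PySem.List.pyRange 2 (M + 2) 1).map (fun b => (1:Int) * b))).1).reverse := by
    simp [build_A_alt, hN]
  rw [foldl_cons_eq_reverse_map, halt, dp_fold_eq]
  have h2 : ((M:Int) + 2 - 2) = M - 0 := by ring
  rw [PySem.List.pyRange_one 0 N, PySem.List.pyRange_one 0 M, PySem.List.pyRange_one 2 (M + 2), h2]
  simp only [List.append_nil, List.reverse_reverse, List.reverse_nil, List.nil_append,
    List.length_map, List.length_range, List.map_map]
  congr 1
  funext k
  simp only [Function.comp_apply]
  rw [foldl_cons_eq_reverse_map]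
  simp only [List.append_nil, List.reverse_reverse, List.map_map]
  congr 1
  funext j
  simp only [Function.comp_apply]
  ring
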